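-- pv_equiv track=rewrite | github.com/aedmark/Bonepoke-Fractal | Archive/BoneAmanita452.py | _measure_bleed
-- ===== SOURCE A (Python) =====
-- import string
--
-- class TheLexicon:
--     _BASE_HEAVY = {"stone", "iron", "mud", "dirt", "wood", "grain", "clay", "lead", "bone", "blood", "salt", "rust", "root", "ash", "meat", "steel", "gold", "obsidian", "granite"}
--     _BASE_KINETIC = {"run", "hit", "break", "take", "make", "press", "build", "cut", "drive", "lift", "carry", "strike", "burn", "shatter", "throw", "kick", "pull", "crash", "explode"}
--     _BASE_ABSTRACT = {"system", "protocol", "sequence", "vector", "node", "context", "layer", "matrix", "perspective", "framework", "logic", "concept", "theory", "analysis"}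
--     _BASE_PHOTO = {"light", "sun", "ray", "beam", "glow", "shine", "spark", "fire", "flame", "star", "day", "dawn", "neon", "laser"}
--     _BASE_AEROBIC = {"balloon", "feather", "cloud", "bubble", "steam", "breeze", "wing", "petal", "foam", "spark", "kite", "dust", "sky", "breath", "whisper"}
--     _BASE_PLAY = {"bounce", "dance", "twirl", "float", "wobble", "tickle", "jiggle", "soar", "wander", "wonder", "riff", "jam", "play", "skip", "hop"}
--     _BASE_THERMAL = {"fire", "flame", "burn", "heat", "hot", "blaze", "sear", "char", "ash", "ember", "sun", "boil", "lava", "inferno"}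
--     _BASE_CRYO = {"ice", "cold", "freeze", "frost", "snow", "chill", "numb", "shiver", "glacier", "frozen", "hail", "winter", "zero"}
--     SOLVENTS = {"is", "are", "was", "were", "the", "a", "an", "and", "but", "or", "if", "then"}
--
--     _TRANSLATOR = str.maketrans(string.punctuation, " " * len(string.punctuation))
--
--     # Dictionary mapping word -> last_seen_tick
--     LEARNED_VOCAB = {
--         "heavy": {}, "kinetic": {}, "abstract": {}, "photo": {},
--         "aerobic": {}, "thermal": {}, "cryo": {}
--     }
--
--     @classmethod
--     def clean(cls, text):
--         return text.lower().translate(cls._TRANSLATOR).split()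
--
--     @classmethod
--     def get(cls, category):
--         base = getattr(cls, f"_BASE_{category.upper()}", set())
--         # Reconstruct set from the dictionary keys
--         learned = set(cls.LEARNED_VOCAB.get(category, {}).keys())
--         return base | learned
--
--     @classmethod
--     def teach(cls, word, category, tick):
--         """Teaches a word, or refreshes it if it exists."""
--         if category in cls.LEARNED_VOCAB:
--             cls.LEARNED_VOCAB[category][word.lower()] = tick
--             return True
--         return False
--
--     @classmethod
--     def touch(cls, clean_words, tick):
--         """Refreshes the timestamps of any learned words found in input."""
--         for cat, words in cls.LEARNED_VOCAB.items():
--             for w in clean_words: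
--                 if w in words:
--                     words[w] = tick
--
--     @classmethod
--     def atrophy(cls, current_tick, max_age=100):
--         """Removes words not seen in 'max_age' ticks."""
--         rotted = []
--         for cat, words in cls.LEARNED_VOCAB.items():
--             to_remove = [w for w, last_tick in words.items() if (current_tick - last_tick) > max_age]
--             for w in to_remove:
--                 del words[w]
--                 rotted.append(f"{w}({cat})")
--         return rotted
--
-- def _measure_bleed(clean_words):
--     """
--     Detect contradiction bleed between Heavy and Aerobic words within 3-word window.
--     Optimized to O(n) using sliding window.
--     """
--     window = []
--
--     for i, word in enumerate(clean_words):
--         window.append(word)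
--         if len(window) > 3:
--             window.pop(0)
--
--         # Check window state
--         heavy_in_window = any(w in TheLexicon.get("heavy") for w in window)
--         aerobic_in_window = any(w in TheLexicon.get("aerobic") for w in window)
--
--         if heavy_in_window and aerobic_in_window:
--             return True
--     return False
-- ===== SOURCE B (Python) =====
-- _HEAVY = frozenset({"stone", "iron", "mud", "dirt", "wood", "grain", "clay", "lead", "bone", "blood", "salt", "rust", "root", "ash", "meat", "steel", "gold", "obsidian", "granite"})
-- _AEROBIC = frozenset({"balloon", "feather", "cloud", "bubble", "steam", "breeze", "wing", "petal", "foam", "spark", "kite", "dust", "sky", "breath", "whisper"})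
--
--
-- def _measure_bleed(clean_words):
--     """Single pass tracking the last index of a heavy and of an aerobic word;
--     bleed iff both lie within the current 3-word window."""
--     last_heavy = None
--     last_aerobic = None
--     for i, w in enumerate(clean_words):
--         if w in _HEAVY:
--             last_heavy = i
--         if w in _AEROBIC:
--             last_aerobic = i
--         if last_heavy is not None and last_aerobic is not None \
--                 and last_heavy >= i - 2 and last_aerobic >= i - 2:
--             return True
--     return False
-- ===== Notes on version B (the rewrite author's own statement) =====
-- stated objective: faster
-- what changed: Replaces the explicit 3-word sliding window list (append/pop and two any-scans over a window whose every membership test rebuilds the lexicon set via TheLexicon.get) with a single pass that tracks only the last index of a heavy and of an aerobic word and compares both against i-2.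
import Mathlib
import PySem

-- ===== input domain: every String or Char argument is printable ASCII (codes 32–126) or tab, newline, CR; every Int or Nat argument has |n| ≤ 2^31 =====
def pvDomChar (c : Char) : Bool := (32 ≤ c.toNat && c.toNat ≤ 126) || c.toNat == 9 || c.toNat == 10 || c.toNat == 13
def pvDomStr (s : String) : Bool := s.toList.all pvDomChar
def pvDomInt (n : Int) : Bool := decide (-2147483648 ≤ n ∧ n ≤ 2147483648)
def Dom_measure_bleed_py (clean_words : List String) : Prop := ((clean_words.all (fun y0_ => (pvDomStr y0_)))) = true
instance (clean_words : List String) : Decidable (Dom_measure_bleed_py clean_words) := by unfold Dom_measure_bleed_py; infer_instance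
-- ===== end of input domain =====

-- B replaces A's sliding-window list by tracking the last heavy/aerobic indices; return values proved equal.

-- ===== PORT A =====
-- TheLexicon.get("heavy") / get("aerobic"): base set ∪ learned (LEARNED_VOCAB is empty), as a PySem.Set
def pvHeavySet : PySem.Set String := PySem.Set.ofList
  ["stone", "iron", "mud", "dirt", "wood", "grain", "clay", "lead", "bone", "blood", "salt",
   "rust", "root", "ash", "meat", "steel", "gold", "obsidian", "granite"]
def pvAerobicSet : PySem.Set String := PySem.Set.ofList
  ["balloon", "feather", "cloud", "bubble", "steam", "breeze", "wing", "petal", "foam",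
   "spark", "kite", "dust", "sky", "breath", "whisper"]

-- the for-loop of _measure_bleed, carrying the window list
def pvGoA (window : List String) (ws : List String) : Bool :=
  match ws with
  | [] => false
  | w :: rest =>
    let window1 := window ++ [w]
    let window2 := if window1.length > 3 then window1.drop 1 else window1  -- window.pop(0)
    if (window2.any (fun x => PySem.Set.contains pvHeavySet x)) &&
       (window2.any (fun x => PySem.Set.contains pvAerobicSet x)) then true
    else pvGoA window2 rest

def measure_bleed_py (clean_words : List String) : Bool := pvGoA [] clean_words

-- ===== PORT B =====
-- 'last_heavy is not None and last_heavy >= i-2'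
def pvOptGe (o : Option Int) (m : Int) : Bool :=
  match o with
  | none => false
  | some j => decide (j ≥ m)

def pvGoB (i : Int) (lh la : Option Int) (ws : List String) : Bool :=
  match ws with
  | [] => false
  | w :: rest =>
    let lh1 := if PySem.Set.contains pvHeavySet w then some i else lh
    let la1 := if PySem.Set.contains pvAerobicSet w then some i else la
    if pvOptGe lh1 (i - 2) && pvOptGe la1 (i - 2) then true
    else pvGoB (i + 1) lh1 la1 rest

def measure_bleed_py_alt (clean_words : List String) : Bool := pvGoB 0 none none clean_words

-- ===== PRECONDITION & SPEC =====
def Spec_measure_bleed_py (clean_words : List String) (out : Bool) : Prop := out = measure_bleed_py_alt clean_words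
instance (clean_words : List String) (out : Bool) : Decidable (Spec_measure_bleed_py clean_words out) := by unfold Spec_measure_bleed_py; infer_instance

-- ===== CLAIM (what is proved, stated in full; the proofs are below) =====
def Claim_equal_measure_bleed_py : Prop := ∀ (clean_words : List String), Dom_measure_bleed_py clean_words → Spec_measure_bleed_py clean_words (measure_bleed_py clean_words)

-- ===== LEMMAS AND PROOFS =====

-- Invariant tying A's window to B's last-index: the last t words of the window contain a
-- p-word iff the recorded last index is ≥ i - t (t = 1,2,3), and the index is < i.
def pvInv (window : List String) (p : String → Bool) (i : Int) (lo : Option Int) : Prop :=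
  (window.drop (window.length - 1)).any p = pvOptGe lo (i - 1) ∧
  (window.drop (window.length - 2)).any p = pvOptGe lo (i - 2) ∧
  (window.drop (window.length - 3)).any p = pvOptGe lo (i - 3) ∧
  pvOptGe lo i = false

theorem pvInv_step (window : List String) (p : String → Bool) (i : Int) (lo : Option Int)
    (w : String) (hlen : window.length ≤ 3) (hinv : pvInv window p i lo) :
    (let window1 := window ++ [w]
     let window2 := if window1.length > 3 then window1.drop 1 else window1
     let lo1 : Option Int := if p w then some i else lo
     window2.any p = pvOptGe lo1 (i - 2) ∧ window2.length ≤ 3 ∧ pvInv window2 p (i + 1) lo1) := by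
  obtain ⟨h1, h2, h3, h4⟩ := hinv
  match window, hlen with
  | [], _ =>
    cases hw : p w <;> cases lo <;>
      simp_all [pvInv, pvOptGe] <;> omega
  | [a], _ =>
    cases hpa : p a <;> cases hw : p w <;> cases lo <;>
      simp_all [pvInv, pvOptGe] <;> omega
  | [a, b], _ =>
    cases hpa : p a <;> cases hpb : p b <;> cases hw : p w <;> cases lo <;>
      simp_all [pvInv, pvOptGe] <;> omega
  | [a, b, c], _ =>
    cases hpa : p a <;> cases hpb : p b <;> cases hpc : p c <;> cases hw : p w <;> cases lo <;>
      simp_all [pvInv, pvOptGe] <;> omega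

theorem pvGoA_eq_pvGoB (ws : List String) (window : List String) (i : Int)
    (lh la : Option Int) (hlen : window.length ≤ 3)
    (hH : pvInv window (fun x => PySem.Set.contains pvHeavySet x) i lh)
    (hA : pvInv window (fun x => PySem.Set.contains pvAerobicSet x) i la) :
    pvGoA window ws = pvGoB i lh la ws := by
  induction ws generalizing window i lh la with
  | nil => rfl
  | cons w rest ih =>
    obtain ⟨eH, hlen2, hH2⟩ := pvInv_step window _ i lh w hlen hH
    obtain ⟨eA, _, hA2⟩ := pvInv_step window _ i la w hlen hA
    simp only [pvGoA, pvGoB]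
    rw [eH, eA]
    exact if_congr Iff.rfl rfl (ih _ _ _ _ hlen2 hH2 hA2)

-- ===== VERDICT (by name: the statement is the Claim_ definition above) =====
theorem measure_bleed_py_spec : Claim_equal_measure_bleed_py := by
  intro clean_words _
  unfold Spec_measure_bleed_py measure_bleed_py measure_bleed_py_alt
  exact pvGoA_eq_pvGoB clean_words [] 0 none none (by simp)
    ⟨rfl, rfl, rfl, rfl⟩ ⟨rfl, rfl, rfl, rfl⟩
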